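-- pv_equiv track=rewrite | github.com/USAFADFCS/final-project-kwon-and-diego | src/agent/weekly_agent.py | _force_sleep_last
-- ===== SOURCE A (Python) =====
-- def _force_sleep_last(schedule: dict) -> dict:
--     fixed = {}
--     for day, entries in schedule.items():
--         non_sleep = []
--         sleep_blocks = []
--         for e in entries:
--             if "-Sleep" in e:
--                 sleep_blocks.append(e)
--             else:
--                 non_sleep.append(e)
--         fixed[day] = non_sleep + sleep_blocks
--     return fixed
-- ===== SOURCE B (Python) =====
-- def _force_sleep_last(schedule: dict) -> dict:
--     # Stable sort by boolean key: non-sleep (False) entries come before sleep (True),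
--     # each group keeping its original order.
--     return {day: sorted(entries, key=lambda e: "-Sleep" in e)
--             for day, entries in schedule.items()}
-- ===== Notes on version B (the rewrite author's own statement) =====
-- stated objective: idiomatic
-- what changed: Replaced the manual two-list partition loop and concatenation with a dict comprehension using a single stable sort keyed on the boolean '-Sleep' membership (False sorts before True, stability preserves intra-group order).
import Mathlib
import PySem

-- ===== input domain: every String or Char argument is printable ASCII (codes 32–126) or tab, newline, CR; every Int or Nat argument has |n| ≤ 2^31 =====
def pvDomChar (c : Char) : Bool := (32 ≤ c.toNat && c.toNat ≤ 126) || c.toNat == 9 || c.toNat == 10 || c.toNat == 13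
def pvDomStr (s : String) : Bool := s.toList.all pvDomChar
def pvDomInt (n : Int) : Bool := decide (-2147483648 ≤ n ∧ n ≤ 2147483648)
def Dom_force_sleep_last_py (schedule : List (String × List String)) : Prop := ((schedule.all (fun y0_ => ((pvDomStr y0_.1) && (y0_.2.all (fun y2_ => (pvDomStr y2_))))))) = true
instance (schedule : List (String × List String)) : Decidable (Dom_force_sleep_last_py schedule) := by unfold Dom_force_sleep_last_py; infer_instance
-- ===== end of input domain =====

-- B replaces the manual two-list partition per day with one stable boolean-key sort (idiomatic; same cost class).

-- ===== PORT A =====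
-- Port of A: for each day, partition entries into non-sleep and sleep via one pass, concatenate.
def force_sleep_last_py (schedule : List (String × List String)) : List (String × List String) :=
  (schedule.foldl (fun fixed dayEntries =>
      let p := dayEntries.2.foldl
        (fun acc e => if PySem.Str.isIn "-Sleep" e then (acc.1, acc.2 ++ [e]) else (acc.1 ++ [e], acc.2))
        ([], [])
      fixed.insert dayEntries.1 (p.1 ++ p.2))
    PySem.Dict.empty).items

-- ===== PORT B =====
-- Port of B: dict comprehension; per day one stable sort keyed on the boolean "-Sleep" membership.
def force_sleep_last_py_alt (schedule : List (String × List String)) : List (String × List String) :=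
  (schedule.foldl (fun fixed dayEntries =>
      fixed.insert dayEntries.1
        (PySem.List.sorted dayEntries.2 (fun e => PySem.Str.isIn "-Sleep" e) false))
    PySem.Dict.empty).items

-- ===== PRECONDITION & SPEC =====
def Spec_force_sleep_last_py (schedule : List (String × List String)) (out : List (String × List String)) : Prop := out = force_sleep_last_py_alt schedule
instance (schedule : List (String × List String)) (out : List (String × List String)) : Decidable (Spec_force_sleep_last_py schedule out) := by unfold Spec_force_sleep_last_py; infer_instance

-- ===== CLAIM (what is proved, stated in full; the proofs are below) =====
def Claim_equal_force_sleep_last_py : Prop := ∀ (schedule : List (String × List String)), Dom_force_sleep_last_py schedule → Spec_force_sleep_last_py schedule (force_sleep_last_py schedule)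

-- ===== LEMMAS AND PROOFS =====

-- Inserting a false-key element into (all-false ++ all-true) places it between the groups.
theorem insertBy_false_key {α : Type} (key : α → Bool) (x : α) (hx : key x = false)
    (F T : List α) (hF : ∀ y ∈ F, key y = false) (hT : ∀ y ∈ T, key y = true) :
    PySem.List.insertBy (fun a b => decide (key a < key b)) x (F ++ T) = F ++ x :: T := by
  induction F with
  | nil =>
    cases T with
    | nil => simp [PySem.List.insertBy]
    | cons t ts =>
      have ht : key t = true := hT t (by simp)
      simp [PySem.List.insertBy, hx, ht]
  | cons f fs ih =>
    have hf : key f = false := hF f (by simp)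
    simp [PySem.List.insertBy, hx, hf, ih (fun y hy => hF y (List.mem_cons_of_mem _ hy))]

-- Inserting a true-key element appends it at the end.
theorem insertBy_true_key {α : Type} (key : α → Bool) (x : α) (hx : key x = true) (l : List α) :
    PySem.List.insertBy (fun a b => decide (key a < key b)) x l = l ++ [x] := by
  apply PySem.List.insertBy_of_forall_not_before
  intro y _
  simp [hx]

-- The insertion-sort fold over a boolean key keeps a (false-group ++ true-group) accumulator.
theorem foldl_insertBy_bool {α : Type} (key : α → Bool) :
    ∀ (xs F T : List α), (∀ y ∈ F, key y = false) → (∀ y ∈ T, key y = true) →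
    xs.foldl (fun acc x => PySem.List.insertBy (fun a b => decide (key a < key b)) x acc) (F ++ T)
      = (F ++ xs.filter (fun e => !key e)) ++ (T ++ xs.filter key) := by
  intro xs
  induction xs with
  | nil => intro F T _ _; simp
  | cons x rest ih =>
    intro F T hF hT
    cases hx : key x with
    | false =>
      have := insertBy_false_key key x hx F T hF hT
      simp only [List.foldl_cons, this]
      have h2 := ih (F ++ [x]) T
        (by intro y hy; rcases List.mem_append.mp hy with h | h
            · exact hF y h
            · simp at h; subst h; exact hx) hT
      simp only [List.append_assoc, List.singleton_append] at h2 ⊢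
      rw [h2]
      simp [hx]
    | true =>
      have := insertBy_true_key key x hx (F ++ T)
      simp only [List.foldl_cons, this]
      have h2 := ih F (T ++ [x]) hF
        (by intro y hy; rcases List.mem_append.mp hy with h | h
            · exact hT y h
            · simp at h; subst h; exact hx)
      simp only [List.append_assoc, List.singleton_append] at h2 ⊢
      rw [h2]
      simp [hx]

-- sorted with a boolean key is the stable partition: false group first, then true group.
theorem sorted_bool_key {α : Type} (key : α → Bool) (xs : List α) :
    PySem.List.sorted xs key false = xs.filter (fun e => !key e) ++ xs.filter key := by
  have := foldl_insertBy_bool key xs [] [] (by simp) (by simp)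
  simpa [PySem.List.sorted] using this

-- A's inner partition loop appends to the two accumulator lists.
theorem partition_fold (key : String → Bool) :
    ∀ (xs ns sb : List String),
    xs.foldl (fun acc e => if key e then (acc.1, acc.2 ++ [e]) else (acc.1 ++ [e], acc.2)) (ns, sb)
      = (ns ++ xs.filter (fun e => !key e), sb ++ xs.filter key) := by
  intro xs
  induction xs with
  | nil => intro ns sb; simp
  | cons x rest ih =>
    intro ns sb
    cases hx : key x with
    | false => simp [List.foldl_cons, hx, ih]
    | true => simp [List.foldl_cons, hx, ih]

-- The per-day value of A equals the per-day value of B, so the dict folds coincide.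
theorem fold_eq : ∀ (schedule : List (String × List String)) (d : PySem.Dict String (List String)),
    schedule.foldl (fun fixed dayEntries =>
      let p := dayEntries.2.foldl
        (fun acc e => if PySem.Str.isIn "-Sleep" e then (acc.1, acc.2 ++ [e]) else (acc.1 ++ [e], acc.2))
        ([], [])
      fixed.insert dayEntries.1 (p.1 ++ p.2)) d
    = schedule.foldl (fun fixed dayEntries =>
      fixed.insert dayEntries.1
        (PySem.List.sorted dayEntries.2 (fun e => PySem.Str.isIn "-Sleep" e) false)) d := by
  intro schedule
  induction schedule with
  | nil => intro d; rfl
  | cons p rest ih =>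
    intro d
    simp only [List.foldl_cons]
    rw [partition_fold (fun e => PySem.Str.isIn "-Sleep" e) p.2 [] [],
        sorted_bool_key (fun e => PySem.Str.isIn "-Sleep" e) p.2]
    exact ih _

-- ===== VERDICT (by name: the statement is the Claim_ definition above) =====
theorem force_sleep_last_py_spec : Claim_equal_force_sleep_last_py := by
  intro schedule _
  unfold Spec_force_sleep_last_py force_sleep_last_py force_sleep_last_py_alt
  rw [fold_eq]
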